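-- pv_equiv track=rewrite | github.com/junghankim-git/test_codes | program/wav_grid/draw/dev/class_wav_grid.py | define_ranks
-- ===== SOURCE A (Python) =====
-- def define_ranks(nx,ny,nprocs,mask):
--
--   rank    = [[-1 for j in range(ny)] for i in range(nx)]
--   rank_l  = [[-1 for j in range(ny)] for i in range(nx)]
--   rank_s  = [[-1 for j in range(ny)] for i in range(nx)]
--
--   iproc   = 0
--   iproc_l = 0
--   iproc_s = 0
--   for j in range(ny):
--     for i in range(nx):
--       if   mask[i][j]==0:
--         rank_s[i][j] = iproc_s
--         iproc_s = iproc_s+1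
--         if iproc_s==nprocs: iproc_s=0
--         rank[i][j] = rank_s[i][j]
--       elif mask[i][j]==1:
--         rank_l[i][j] = iproc_l
--         iproc_l = iproc_l+1
--         if iproc_l==nprocs: iproc_l=0
--         rank[i][j] = rank_l[i][j]
--
--   return rank, rank_l, rank_s
-- ===== SOURCE B (Python) =====
-- def define_ranks(nx, ny, nprocs, mask):
--     # Two-phase re-implementation: first collect, per mask class, the cells of
--     # that class in A's scan order (j outer, i inner); assign the wrapping
--     # round-robin counter along that flat list; finally merge the two per-class
--     # grids cellwise into the combined rank grid (a cell belongs to one class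
--     # at most, -1 marks 'unassigned'; rank values are never negative).
--     def assign(cls):
--         cells = [(i, j) for j in range(ny) for i in range(nx) if mask[i][j] == cls]
--         grid = [[-1] * ny for _ in range(nx)]
--         c = 0
--         for (i, j) in cells:
--             grid[i][j] = c
--             c = 0 if c + 1 == nprocs else c + 1
--         return grid
--
--     rank_s = assign(0)
--     rank_l = assign(1)
--     rank = [[s if s != -1 else l for s, l in zip(row_s, row_l)]
--             for row_s, row_l in zip(rank_s, rank_l)]
--     return rank, rank_l, rank_s
-- ===== Notes on version B (the rewrite author's own statement) =====
-- stated objective: alternative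
-- what changed: A's single fused scan with three grids and inline branching is replaced by a per-class decomposition: for each mask class collect that class's cells in scan order, run the wrapping round-robin counter down that flat list to fill its grid, then merge the two per-class grids cellwise (taking the non--1 entry) to form the combined rank grid.
import Mathlib
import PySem

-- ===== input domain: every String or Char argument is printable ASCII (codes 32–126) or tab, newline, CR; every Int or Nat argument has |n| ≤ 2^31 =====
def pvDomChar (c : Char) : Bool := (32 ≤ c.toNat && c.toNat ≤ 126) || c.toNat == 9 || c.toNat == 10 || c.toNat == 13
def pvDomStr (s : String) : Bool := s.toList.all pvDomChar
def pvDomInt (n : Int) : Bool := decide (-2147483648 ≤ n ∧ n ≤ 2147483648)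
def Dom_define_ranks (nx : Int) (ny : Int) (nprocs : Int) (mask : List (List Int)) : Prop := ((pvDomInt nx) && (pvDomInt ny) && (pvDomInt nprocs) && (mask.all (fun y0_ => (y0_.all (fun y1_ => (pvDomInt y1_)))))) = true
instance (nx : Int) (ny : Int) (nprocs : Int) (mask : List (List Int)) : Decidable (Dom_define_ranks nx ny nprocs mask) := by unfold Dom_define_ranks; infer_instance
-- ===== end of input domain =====

-- B replaces A's fused scan by an assign-per-class / merge decomposition: per mask
-- class it collects that class's cells in scan order, runs the wrapping round-robin
-- counter down that flat list, and then combines the two per-class grids cellwise.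
-- Objective: alternative decomposition (same cost); return-value equivalence only
-- (A mutates only lists it creates itself, so no observable argument mutation).

-- Shared low-level helpers (exact ports of Python list indexing/assignment at
-- the nonnegative in-range indices both programs use; under Pre_ every mask
-- access is in range, so the getD defaults are never the value Python reads).
def pvMget (mask : List (List Int)) (i j : Nat) : Int := (mask.getD i []).getD j (-2)
def pvGet2 (g : List (List Int)) (i j : Nat) : Int := (g.getD i []).getD j (-1)
def pvSet2 (g : List (List Int)) (i j : Nat) (v : Int) : List (List Int) :=
  g.modify i (fun row => row.set j v)
-- [[-1 for j in range(ny)] for i in range(nx)]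
def pvInit (nx' ny' : Nat) : List (List Int) :=
  (List.range nx').map (fun _ => (List.range ny').map (fun _ => (-1:Int)))

-- ===== PORT A =====
-- A's loop body; state = (rank, rank_l, rank_s, iproc_l, iproc_s)
-- (Python's `iproc = 0` is dead: never read, never returned; dropped.)
def stepA (nprocs : Int) (mask : List (List Int)) :
    (List (List Int) × List (List Int) × List (List Int) × Int × Int) → (Nat × Nat) →
    (List (List Int) × List (List Int) × List (List Int) × Int × Int)
  | (rank, rank_l, rank_s, iproc_l, iproc_s), (i, j) =>
    if pvMget mask i j == 0 then
      let rank_s := pvSet2 rank_s i j iproc_s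
      let iproc_s := iproc_s + 1
      let iproc_s := if iproc_s == nprocs then (0:Int) else iproc_s
      let rank := pvSet2 rank i j (pvGet2 rank_s i j)   -- rank[i][j] = rank_s[i][j]
      (rank, rank_l, rank_s, iproc_l, iproc_s)
    else if pvMget mask i j == 1 then
      let rank_l := pvSet2 rank_l i j iproc_l
      let iproc_l := iproc_l + 1
      let iproc_l := if iproc_l == nprocs then (0:Int) else iproc_l
      let rank := pvSet2 rank i j (pvGet2 rank_l i j)   -- rank[i][j] = rank_l[i][j]
      (rank, rank_l, rank_s, iproc_l, iproc_s)
    else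
      (rank, rank_l, rank_s, iproc_l, iproc_s)

def define_ranks (nx : Int) (ny : Int) (nprocs : Int) (mask : List (List Int)) :
    List (List Int) × List (List Int) × List (List Int) :=
  let rank   := pvInit nx.toNat ny.toNat
  let rank_l := pvInit nx.toNat ny.toNat
  let rank_s := pvInit nx.toNat ny.toNat
  -- for j in range(ny): for i in range(nx): …   (range(n) is empty for n ≤ 0, hence toNat)
  let st := (List.range ny.toNat).foldl
    (fun st j => (List.range nx.toNat).foldl (fun st i => stepA nprocs mask st (i, j)) st)
    (rank, rank_l, rank_s, 0, 0)
  (st.1, st.2.1, st.2.2.1)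

-- ===== PORT B =====
-- B's counter step: grid[i][j] = c; c = 0 if c+1 == nprocs else c+1
def stepB (nprocs : Int) (st : List (List Int) × Int) (c : Nat × Nat) : List (List Int) × Int :=
  (pvSet2 st.1 c.1 c.2 st.2, if st.2 + 1 == nprocs then (0:Int) else st.2 + 1)

-- B's assign(cls): collect the class's cells in scan order, then run the counter
def pvAssign (nx : Int) (ny : Int) (nprocs : Int) (mask : List (List Int)) (cls : Int) :
    List (List Int) :=
  let cells := (List.range ny.toNat).flatMap
    (fun j => ((List.range nx.toNat).filter (fun i => pvMget mask i j == cls)).map (fun i => (i, j)))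
  (cells.foldl (stepB nprocs) (pvInit nx.toNat ny.toNat, 0)).1

-- rank = [[s if s != -1 else l for s, l in zip(row_s, row_l)] for row_s, row_l in zip(rank_s, rank_l)]
def pvMergeRow (rs rl : List Int) : List Int :=
  List.zipWith (fun s l => if s ≠ -1 then s else l) rs rl
def pvMerge (rs rl : List (List Int)) : List (List Int) := List.zipWith pvMergeRow rs rl

def define_ranks_alt (nx : Int) (ny : Int) (nprocs : Int) (mask : List (List Int)) :
    List (List Int) × List (List Int) × List (List Int) :=
  let rank_s := pvAssign nx ny nprocs mask 0
  let rank_l := pvAssign nx ny nprocs mask 1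
  (pvMerge rank_s rank_l, rank_l, rank_s)

-- ===== PRECONDITION & SPEC =====
-- Pre_ excludes exactly the inputs where Python A raises IndexError: whenever both
-- loops actually run (nx > 0 and ny > 0), mask must have at least nx rows and each
-- of the first nx rows at least ny entries.
def Pre_define_ranks (nx : Int) (ny : Int) (nprocs : Int) (mask : List (List Int)) : Prop :=
  0 < nx → 0 < ny →
    (nx.toNat ≤ mask.length ∧ ∀ row ∈ mask.take nx.toNat, ny ≤ (row.length : Int))
instance (nx : Int) (ny : Int) (nprocs : Int) (mask : List (List Int)) : Decidable (Pre_define_ranks nx ny nprocs mask) := by unfold Pre_define_ranks; infer_instance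
def pvWitness_define_ranks : Int × Int × Int × List (List Int) := (2, 2, 2, [[0, 1], [1, 0]])

def Spec_define_ranks (nx : Int) (ny : Int) (nprocs : Int) (mask : List (List Int)) (out : List (List Int) × List (List Int) × List (List Int)) : Prop := out = define_ranks_alt nx ny nprocs mask
instance (nx : Int) (ny : Int) (nprocs : Int) (mask : List (List Int)) (out : List (List Int) × List (List Int) × List (List Int)) : Decidable (Spec_define_ranks nx ny nprocs mask out) := by unfold Spec_define_ranks; infer_instance

-- ===== CLAIM (what is proved, stated in full; the proofs are below) =====
def Claim_equal_define_ranks : Prop := ∀ (nx : Int) (ny : Int) (nprocs : Int) (mask : List (List Int)), Dom_define_ranks nx ny nprocs mask → Pre_define_ranks nx ny nprocs mask → Spec_define_ranks nx ny nprocs mask (define_ranks nx ny nprocs mask)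

-- ===== LEMMAS AND PROOFS =====

def pvShape (nx' ny' : Nat) (g : List (List Int)) : Prop :=
  g.length = nx' ∧ ∀ row ∈ g, row.length = ny'

-- cells of the given class never get assigned in the other class's grid
def pvClean (mask : List (List Int)) (cls : Int) (g : List (List Int)) : Prop :=
  ∀ i j : Nat, pvMget mask i j ≠ cls → pvGet2 g i j = -1

def pvCells (nx' ny' : Nat) : List (Nat × Nat) :=
  (List.range ny').flatMap (fun j => (List.range nx').map (fun i => (i, j)))

theorem pvShape_init (nx' ny' : Nat) : pvShape nx' ny' (pvInit nx' ny') := by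
  constructor <;> simp [pvInit]

theorem pvGet2_init (nx' ny' i j : Nat) : pvGet2 (pvInit nx' ny') i j = -1 := by
  unfold pvGet2 pvInit
  simp only [List.map_const', List.getD, List.getElem?_replicate]
  split
  · simp [List.getElem?_replicate]; split <;> simp
  · simp

theorem pvShape_set (nx' ny' : Nat) (g : List (List Int)) (i j : Nat) (v : Int)
    (h : pvShape nx' ny' g) : pvShape nx' ny' (pvSet2 g i j v) := by
  refine ⟨by simpa [pvSet2] using h.1, ?_⟩
  intro row hrow
  obtain ⟨k, hk, hval⟩ := List.getElem_of_mem hrow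
  rw [List.getElem_eq_iff] at hval
  rw [show pvSet2 g i j v = g.modify i (fun row => row.set j v) from rfl,
      List.getElem?_modify] at hval
  rcases hg : g[k]? with _ | row'
  · simp [hg] at hval
  · have hm : row' ∈ g := List.mem_of_getElem? hg
    simp only [hg] at hval
    split at hval <;>
      simp only [Option.map_eq_map, Option.map_some, Option.some.injEq] at hval <;> rw [← hval]
    · simpa using h.2 row' hm
    · exact h.2 row' hm

theorem pvGet2_set_self (nx' ny' : Nat) (g : List (List Int)) (i j : Nat) (v : Int)
    (h : pvShape nx' ny' g) (hi : i < nx') (hj : j < ny') :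
    pvGet2 (pvSet2 g i j v) i j = v := by
  have hi' : i < g.length := h.1 ▸ hi
  obtain ⟨row, hrow⟩ : ∃ row, g[i]? = some row := ⟨g[i], List.getElem?_eq_getElem hi'⟩
  have hm : row ∈ g := List.mem_of_getElem? hrow
  have hlen : j < row.length := by rw [h.2 row hm]; exact hj
  unfold pvGet2 pvSet2
  simp [List.getD, List.getElem?_modify, hrow, List.getElem?_set, hlen]

theorem pvGet2_set_ne (g : List (List Int)) (i j i' j' : Nat) (v : Int)
    (h : i' ≠ i ∨ j' ≠ j) : pvGet2 (pvSet2 g i j v) i' j' = pvGet2 g i' j' := by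
  unfold pvGet2 pvSet2
  rcases eq_or_ne i' i with rfl | hi
  · have hj : j' ≠ j := h.resolve_left (by simp)
    rcases hg : g[i']? with _ | row <;>
      simp [List.getD, List.getElem?_modify, hg, List.getElem?_set, (Ne.symm hj)]
  · simp [List.getD, List.getElem?_modify, Ne.symm hi]

theorem pvClean_init (mask : List (List Int)) (cls : Int) (nx' ny' : Nat) :
    pvClean mask cls (pvInit nx' ny') := by
  intro i j _; exact pvGet2_init nx' ny' i j

theorem pvClean_set (mask : List (List Int)) (cls : Int) (g : List (List Int))
    (i j : Nat) (v : Int) (h : pvClean mask cls g) (hm : pvMget mask i j = cls) :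
    pvClean mask cls (pvSet2 g i j v) := by
  intro i' j' hne
  rcases eq_or_ne i' i with rfl | hi
  · rcases eq_or_ne j' j with rfl | hj
    · exact absurd hm hne
    · rw [pvGet2_set_ne _ _ _ _ _ _ (Or.inr hj)]; exact h _ _ hne
  · rw [pvGet2_set_ne _ _ _ _ _ _ (Or.inl hi)]; exact h _ _ hne

theorem pvMergeRow_self (r : List Int) : pvMergeRow r r = r := by
  induction r with
  | nil => rfl
  | cons a t ih =>
    show pvMergeRow (a :: t) (a :: t) = a :: t
    simpa [pvMergeRow, List.zipWith] using congrArg id ih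

theorem pvMerge_self (g : List (List Int)) : pvMerge g g = g := by
  induction g with
  | nil => rfl
  | cons r t ih => simp [pvMerge, List.zipWith] at ih ⊢; exact ⟨pvMergeRow_self r, ih⟩

theorem pvMergeRow_set_left (a b : List Int) (j : Nat) (v : Int)
    (hj : j < a.length) (hv : v ≠ -1) :
    pvMergeRow (a.set j v) b = (pvMergeRow a b).set j v := by
  induction a generalizing b j with
  | nil => simp at hj
  | cons x xs ih =>
    cases b with
    | nil => simp [pvMergeRow]
    | cons y ys =>
      cases j with
      | zero => simp [pvMergeRow, List.zipWith, hv]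
      | succ j => simp [pvMergeRow, List.zipWith] at ih ⊢; exact ih ys j (by simpa using hj)

theorem pvMergeRow_set_right (a b : List Int) (j : Nat) (v : Int)
    (hj : j < a.length) (h0 : a.getD j (-1) = -1) :
    pvMergeRow a (b.set j v) = (pvMergeRow a b).set j v := by
  induction a generalizing b j with
  | nil => simp at hj
  | cons x xs ih =>
    cases b with
    | nil => simp [pvMergeRow]
    | cons y ys =>
      cases j with
      | zero => simp [List.getD] at h0; simp [pvMergeRow, List.zipWith, h0]
      | succ j =>
        simp [pvMergeRow, List.zipWith] at ih ⊢
        exact ih ys j (by simpa using hj) (by simpa [List.getD] using h0)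

theorem pvMerge_set_left (nx' ny' : Nat) (rs rl : List (List Int)) (i j : Nat) (v : Int)
    (hs : pvShape nx' ny' rs) (hl : pvShape nx' ny' rl) (hi : i < nx') (hj : j < ny')
    (hv : v ≠ -1) : pvMerge (pvSet2 rs i j v) rl = pvSet2 (pvMerge rs rl) i j v := by
  apply List.ext_getElem?
  intro k
  show (List.zipWith pvMergeRow (rs.modify i _) rl)[k]? = ((List.zipWith pvMergeRow rs rl).modify i _)[k]?
  rcases eq_or_ne i k with rfl | hik
  · have hi' : i < rs.length := hs.1 ▸ hi
    have hil : i < rl.length := hl.1 ▸ hi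
    have hrs : rs[i]? = some rs[i] := List.getElem?_eq_getElem hi'
    have hrl : rl[i]? = some rl[i] := List.getElem?_eq_getElem hil
    have hjj : j < rs[i].length := by
      rw [hs.2 rs[i] (List.getElem_mem hi')]; exact hj
    simp [List.getElem?_zipWith, List.getElem?_modify, hrs, hrl,
      pvMergeRow_set_left rs[i] rl[i] j v hjj hv]
  · simp only [List.getElem?_zipWith, List.getElem?_modify]
    rcases hg : rs[k]? with _ | a <;> rcases hg' : rl[k]? with _ | b <;>
      simp [hg, hg', hik]

theorem pvMerge_set_right (nx' ny' : Nat) (rs rl : List (List Int)) (i j : Nat) (v : Int)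
    (hs : pvShape nx' ny' rs) (hl : pvShape nx' ny' rl) (hi : i < nx') (hj : j < ny')
    (h0 : pvGet2 rs i j = -1) : pvMerge rs (pvSet2 rl i j v) = pvSet2 (pvMerge rs rl) i j v := by
  apply List.ext_getElem?
  intro k
  show (List.zipWith pvMergeRow rs (rl.modify i _))[k]? = ((List.zipWith pvMergeRow rs rl).modify i _)[k]?
  rcases eq_or_ne i k with rfl | hik
  · have hi' : i < rs.length := hs.1 ▸ hi
    have hil : i < rl.length := hl.1 ▸ hi
    have hrs : rs[i]? = some rs[i] := List.getElem?_eq_getElem hi'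
    have hrl : rl[i]? = some rl[i] := List.getElem?_eq_getElem hil
    have hjj : j < rs[i].length := by
      rw [hs.2 rs[i] (List.getElem_mem hi')]; exact hj
    have h0' : rs[i].getD j (-1) = -1 := by
      unfold pvGet2 at h0
      simpa [List.getD, hrs] using h0
    simp [List.getElem?_zipWith, List.getElem?_modify, hrs, hrl,
      pvMergeRow_set_right rs[i] rl[i] j v hjj h0']
  · simp only [List.getElem?_zipWith, List.getElem?_modify]
    rcases hg : rs[k]? with _ | a <;> rcases hg' : rl[k]? with _ | b <;>
      simp [hg, hg', hik]

-- the main invariant induction: A's fused fold over any cell list equals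
-- B's two per-class folds over the filtered lists, merged
theorem pv_wrap_nonneg (nprocs x : Int) (hx : 0 ≤ x) :
    0 ≤ if x + 1 == nprocs then (0:Int) else x + 1 := by
  split <;> omega

theorem pv_main (nprocs : Int) (mask : List (List Int)) (nx' ny' : Nat) :
    ∀ (L : List (Nat × Nat)) (rs rl : List (List Int)) (s l : Int),
    (∀ c ∈ L, c.1 < nx' ∧ c.2 < ny') →
    pvShape nx' ny' rs → pvShape nx' ny' rl →
    pvClean mask 0 rs → pvClean mask 1 rl →
    0 ≤ s → 0 ≤ l →
    L.foldl (stepA nprocs mask) (pvMerge rs rl, rl, rs, l, s)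
      = (pvMerge ((L.filter (fun c => pvMget mask c.1 c.2 == 0)).foldl (stepB nprocs) (rs, s)).1
                 ((L.filter (fun c => pvMget mask c.1 c.2 == 1)).foldl (stepB nprocs) (rl, l)).1,
         ((L.filter (fun c => pvMget mask c.1 c.2 == 1)).foldl (stepB nprocs) (rl, l)).1,
         ((L.filter (fun c => pvMget mask c.1 c.2 == 0)).foldl (stepB nprocs) (rs, s)).1,
         ((L.filter (fun c => pvMget mask c.1 c.2 == 1)).foldl (stepB nprocs) (rl, l)).2,
         ((L.filter (fun c => pvMget mask c.1 c.2 == 0)).foldl (stepB nprocs) (rs, s)).2) := by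
  intro L
  induction L with
  | nil =>
    intro rs rl s l _ _ _ _ _ _ _
    simp
  | cons c L ih =>
    intro rs rl s l hb hs hl hc0 hc1 hs0 hl0
    obtain ⟨i, j⟩ := c
    have hi : i < nx' := (hb (i, j) (List.mem_cons_self)).1
    have hj : j < ny' := (hb (i, j) (List.mem_cons_self)).2
    have hbL : ∀ c ∈ L, c.1 < nx' ∧ c.2 < ny' := fun c hcm => hb c (List.mem_cons_of_mem _ hcm)
    simp only [List.foldl_cons, List.filter_cons]
    by_cases h0 : pvMget mask i j = 0
    · have hA : stepA nprocs mask (pvMerge rs rl, rl, rs, l, s) (i, j)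
          = (pvMerge (pvSet2 rs i j s) rl, rl, pvSet2 rs i j s, l,
             if s + 1 == nprocs then (0:Int) else s + 1) := by
        have hget : pvGet2 (pvSet2 rs i j s) i j = s :=
          pvGet2_set_self nx' ny' rs i j s hs hi hj
        have hmerge : pvMerge (pvSet2 rs i j s) rl = pvSet2 (pvMerge rs rl) i j s :=
          pvMerge_set_left nx' ny' rs rl i j s hs hl hi hj (by omega)
        simp [stepA, h0, hget, hmerge]
      rw [hA]
      have hrec := ih (pvSet2 rs i j s) rl
        (if s + 1 == nprocs then (0:Int) else s + 1) l hbL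
        (pvShape_set nx' ny' rs i j s hs) hl
        (pvClean_set mask 0 rs i j s hc0 h0) hc1
        (pv_wrap_nonneg nprocs s hs0) hl0
      simp only [h0] at hrec
      simp [h0]
      rw [show stepB nprocs (rs, s) (i, j)
          = (pvSet2 rs i j s, if s + 1 == nprocs then (0:Int) else s + 1) from rfl]
      simpa using hrec
    · by_cases h1 : pvMget mask i j = 1
      · have hA : stepA nprocs mask (pvMerge rs rl, rl, rs, l, s) (i, j)
            = (pvMerge rs (pvSet2 rl i j l), pvSet2 rl i j l, rs,
               (if l + 1 == nprocs then (0:Int) else l + 1), s) := by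
          have hget : pvGet2 (pvSet2 rl i j l) i j = l :=
            pvGet2_set_self nx' ny' rl i j l hl hi hj
          have hmerge : pvMerge rs (pvSet2 rl i j l) = pvSet2 (pvMerge rs rl) i j l :=
            pvMerge_set_right nx' ny' rs rl i j l hs hl hi hj (hc0 i j (by simp [h1]))
          simp [stepA, h0, h1, hget, hmerge]
        rw [hA]
        have hrec := ih rs (pvSet2 rl i j l) s
          (if l + 1 == nprocs then (0:Int) else l + 1) hbL
          hs (pvShape_set nx' ny' rl i j l hl)
          hc0 (pvClean_set mask 1 rl i j l hc1 h1)
          hs0 (pv_wrap_nonneg nprocs l hl0)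
        simp only [h0, h1] at hrec
        simp [h0, h1]
        rw [show stepB nprocs (rl, l) (i, j)
            = (pvSet2 rl i j l, if l + 1 == nprocs then (0:Int) else l + 1) from rfl]
        simpa using hrec
      · have hA : stepA nprocs mask (pvMerge rs rl, rl, rs, l, s) (i, j)
            = (pvMerge rs rl, rl, rs, l, s) := by
          simp [stepA, h0, h1]
        rw [hA]
        have hrec := ih rs rl s l hbL hs hl hc0 hc1 hs0 hl0
        simp [h0, h1]
        simpa using hrec

theorem pv_cells_bound (nx' ny' : Nat) : ∀ c ∈ pvCells nx' ny', c.1 < nx' ∧ c.2 < ny' := by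
  intro c hc
  simp only [pvCells, List.mem_flatMap, List.mem_map, List.mem_range] at hc
  obtain ⟨j, hj, i, hi, rfl⟩ := hc
  exact ⟨hi, hj⟩

theorem pv_A_flat (nx' ny' : Nat) (nprocs : Int) (mask : List (List Int))
    (init : List (List Int) × List (List Int) × List (List Int) × Int × Int) :
    (List.range ny').foldl
      (fun st j => (List.range nx').foldl (fun st i => stepA nprocs mask st (i, j)) st) init
    = (pvCells nx' ny').foldl (stepA nprocs mask) init := by
  simp [pvCells, List.foldl_flatMap, List.foldl_map]

theorem pv_B_cells (nx' ny' : Nat) (mask : List (List Int)) (cls : Int) :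
    (List.range ny').flatMap
      (fun j => ((List.range nx').filter (fun i => pvMget mask i j == cls)).map (fun i => (i, j)))
    = (pvCells nx' ny').filter (fun c => pvMget mask c.1 c.2 == cls) := by
  simp [pvCells, List.filter_flatMap, List.filter_map, Function.comp_def]

-- ===== VERDICT (by name: the statement is the Claim_ definition above) =====
theorem define_ranks_spec : Claim_equal_define_ranks := by
  intro nx ny nprocs mask _ _
  unfold Spec_define_ranks define_ranks define_ranks_alt pvAssign
  simp only [pv_B_cells, pv_A_flat]
  rw [show (pvInit nx.toNat ny.toNat, pvInit nx.toNat ny.toNat, pvInit nx.toNat ny.toNat,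
        (0:Int), (0:Int))
      = (pvMerge (pvInit nx.toNat ny.toNat) (pvInit nx.toNat ny.toNat),
         pvInit nx.toNat ny.toNat, pvInit nx.toNat ny.toNat, (0:Int), (0:Int))
      from by rw [pvMerge_self]]
  rw [pv_main nprocs mask nx.toNat ny.toNat (pvCells nx.toNat ny.toNat)
      (pvInit nx.toNat ny.toNat) (pvInit nx.toNat ny.toNat) 0 0
      (pv_cells_bound _ _) (pvShape_init _ _) (pvShape_init _ _)
      (pvClean_init _ _ _ _) (pvClean_init _ _ _ _) le_rfl le_rfl]
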